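-- pv_equiv track=rewrite | github.com/GuilhermeThomazoni/python | separarPares.py | listas
-- ===== SOURCE A (Python) =====
-- def listas(numero): #Criação da função que cria as listas.
--     numeros_inferiores = [] #Lista dos inferiores
--     numeros_pares = [] #Lista dos pares
--     numeros_impares = [] #lista dos ímpares
--
--     for aux in range(numero + 1): #Para a variável auxiliar no range da variável recebida em limit, somando 1 para que o número limite seja considerado
--         numeros_inferiores.append(aux) #Append para que os números sejam adicionados à lista
--
--         if aux % 2 == 0: #Se for par:
--             numeros_pares.append(aux) #Adiciona à lista dos pares
--         else: #Senão, é ímpar: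
--             numeros_impares.append(aux) #Adiciona à lista dos ímpares
--
--     return numeros_inferiores, numeros_pares, numeros_impares #Retorna as variáveis
-- ===== SOURCE B (Python) =====
-- def listas(numero):
--     # One construction and two strided range builds; no loop, no modulo test.
--     return (list(range(numero + 1)),
--             list(range(0, numero + 1, 2)),
--             list(range(1, numero + 1, 2)))
-- ===== Notes on version B (the rewrite author's own statement) =====
-- stated objective: simpler
-- what changed: Replaces the single pass with a per-element if/else modulo test by three direct range constructions (step 1 for the full list, step 2 starting at 0 and at 1 for evens and odds), with no loop body or branch.
import Mathlib
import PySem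

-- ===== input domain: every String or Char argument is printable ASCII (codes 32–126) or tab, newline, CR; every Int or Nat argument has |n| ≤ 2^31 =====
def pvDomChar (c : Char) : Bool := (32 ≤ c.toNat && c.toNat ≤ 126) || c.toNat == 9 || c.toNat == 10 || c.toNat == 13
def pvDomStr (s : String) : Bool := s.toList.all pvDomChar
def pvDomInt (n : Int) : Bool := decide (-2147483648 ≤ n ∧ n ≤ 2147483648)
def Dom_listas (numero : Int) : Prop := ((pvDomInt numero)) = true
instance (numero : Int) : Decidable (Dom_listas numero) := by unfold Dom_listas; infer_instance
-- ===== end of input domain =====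

-- B builds the three lists directly as ranges (step 1, and step 2 from 0 and from 1) instead of A's
-- single pass with a per-element modulo branch; objective: simpler.


-- ===== PORT A =====
def listas (numero : Int) : List Int × List Int × List Int :=
  (PySem.List.pyRange 0 (numero + 1) 1).foldl
    (fun acc aux =>
      let ni := acc.1 ++ [aux]
      if PySem.Int.mod aux 2 = 0 then (ni, acc.2.1 ++ [aux], acc.2.2)
      else (ni, acc.2.1, acc.2.2 ++ [aux]))
    ([], [], [])

-- ===== PORT B =====
def listas_alt (numero : Int) : List Int × List Int × List Int :=
  (PySem.List.pyRange 0 (numero + 1) 1,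
   PySem.List.pyRange 0 (numero + 1) 2,
   PySem.List.pyRange 1 (numero + 1) 2)

-- ===== PRECONDITION & SPEC =====
def Spec_listas (numero : Int) (out : List Int × List Int × List Int) : Prop := out = listas_alt numero
instance (numero : Int) (out : List Int × List Int × List Int) : Decidable (Spec_listas numero out) := by unfold Spec_listas; infer_instance

-- ===== CLAIM (what is proved, stated in full; the proofs are below) =====
def Claim_equal_listas : Prop := ∀ (numero : Int), Dom_listas numero → Spec_listas numero (listas numero)

-- ===== LEMMAS AND PROOFS =====

theorem pyRange_two_zero_succ (m : Nat) :
    PySem.List.pyRange 0 ((m : Int) + 1) 2 =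
      PySem.List.pyRange 0 (m : Int) 2 ++ (if m % 2 = 0 then [(m : Int)] else []) := by
  rw [PySem.List.pyRange_of_pos _ _ (by norm_num), PySem.List.pyRange_of_pos _ _ (by norm_num)]
  rcases Nat.mod_two_eq_zero_or_one m with h | h
  · have h1 : (if (0:Int) < (m:Int) + 1 then (((m:Int) + 1 - 0 + 2 - 1) / 2).toNat else 0) = m / 2 + 1 := by
      split <;> omega
    have h2 : (if (0:Int) < (m:Int) then (((m:Int) - 0 + 2 - 1) / 2).toNat else 0) = m / 2 := by
      split <;> omega
    rw [h1, h2, List.range_succ, List.map_append, if_pos h]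
    simp
    omega
  · have h1 : (if (0:Int) < (m:Int) + 1 then (((m:Int) + 1 - 0 + 2 - 1) / 2).toNat else 0) = m / 2 + 1 := by
      split <;> omega
    have h2 : (if (0:Int) < (m:Int) then (((m:Int) - 0 + 2 - 1) / 2).toNat else 0) = m / 2 + 1 := by
      split <;> omega
    rw [h1, h2, if_neg (by omega)]
    simp

theorem pyRange_two_one_succ (m : Nat) :
    PySem.List.pyRange 1 ((m : Int) + 1) 2 =
      PySem.List.pyRange 1 (m : Int) 2 ++ (if m % 2 = 1 then [(m : Int)] else []) := by
  rw [PySem.List.pyRange_of_pos _ _ (by norm_num), PySem.List.pyRange_of_pos _ _ (by norm_num)]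
  rcases Nat.mod_two_eq_zero_or_one m with h | h
  · have h1 : (if (1:Int) < (m:Int) + 1 then (((m:Int) + 1 - 1 + 2 - 1) / 2).toNat else 0) = m / 2 := by
      split <;> omega
    have h2 : (if (1:Int) < (m:Int) then (((m:Int) - 1 + 2 - 1) / 2).toNat else 0) = m / 2 := by
      split <;> omega
    rw [h1, h2, if_neg (by omega)]
    simp
  · have h1 : (if (1:Int) < (m:Int) + 1 then (((m:Int) + 1 - 1 + 2 - 1) / 2).toNat else 0) = m / 2 + 1 := by
      split <;> omega
    have h2 : (if (1:Int) < (m:Int) then (((m:Int) - 1 + 2 - 1) / 2).toNat else 0) = m / 2 := by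
      split <;> omega
    rw [h1, h2, List.range_succ, List.map_append, if_pos h]
    simp
    omega

theorem listas_fold_eq (m : Nat) :
    (PySem.List.pyRange 0 (m : Int) 1).foldl
      (fun acc aux =>
        let ni := acc.1 ++ [aux]
        if PySem.Int.mod aux 2 = 0 then (ni, acc.2.1 ++ [aux], acc.2.2)
        else (ni, acc.2.1, acc.2.2 ++ [aux]))
      ([], [], []) =
      (PySem.List.pyRange 0 (m : Int) 1,
       PySem.List.pyRange 0 (m : Int) 2,
       PySem.List.pyRange 1 (m : Int) 2) := by
  induction m with
  | zero => decide
  | succ m ih =>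
    have hcast : ((m + 1 : Nat) : Int) = (m : Int) + 1 := by push_cast; ring
    rw [hcast, PySem.List.pyRange_one_succ_right (by positivity), List.foldl_append, ih,
        pyRange_two_zero_succ, pyRange_two_one_succ]
    rcases Nat.mod_two_eq_zero_or_one m with h | h
    · simp [h, List.foldl]
      omega
    · simp [h, List.foldl]
      omega

-- ===== VERDICT (by name: the statement is the Claim_ definition above) =====
theorem listas_spec : Claim_equal_listas := by
  intro numero _
  unfold Spec_listas listas listas_alt
  by_cases h : numero + 1 ≤ 0
  · rw [PySem.List.pyRange_one_eq_nil h,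
        PySem.List.pyRange_of_pos 0 (numero+1) (s := 2) (by norm_num),
        PySem.List.pyRange_of_pos 1 (numero+1) (s := 2) (by norm_num)]
    rw [if_neg (by omega), if_neg (by omega)]
    simp [List.foldl]
  · have hm : numero + 1 = ((numero + 1).toNat : Int) := by omega

    rw [hm]
    exact listas_fold_eq (numero + 1).toNat
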